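-- pv_equiv track=rewrite | github.com/Percy-Ikana/AOC-2024 | day12/challenge.py | buildRegions
-- ===== SOURCE A (Python) =====
-- def buildRegions(data):
--     regions = []#defaultdict(lambda:set())
--     #This is to exclude things that already have a home
--     containedSquares = set()
--     for square in data:
--         if square in containedSquares: continue # already know where it belongs, skip it.
--         region = {square}
--         toCheck = {(square[0]+x,square[1]+y)  for x in [-1,0,1] for y in [-1,0,1] if (square[0]+x,square[1]+y) in data and abs(x)+abs(y) == 1 and data[(square[0]+x,square[1]+y)] == data[square] and (square[0]+x,square[1]+y) not in region}
--         while len(toCheck) != 0: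
--             cur = toCheck.pop()
--             region.add(cur)
--             toCheck.update({(cur[0]+x,cur[1]+y)  for x in [-1,0,1] for y in [-1,0,1] if (cur[0]+x,cur[1]+y) in data and abs(x)+abs(y) == 1 and data[(cur[0]+x,cur[1]+y)] == data[cur] and (cur[0]+x,cur[1]+y) not in region})
--         containedSquares.update(region)
--         regions.append(region)
--     return regions
-- ===== SOURCE B (Python) =====
-- def buildRegions(data):
--     # Fixpoint saturation instead of a frontier/worklist: for each not-yet-assigned
--     # cell, repeatedly sweep all cells and absorb any same-valued cell that touches
--     # the region, until a sweep changes nothing.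
--     regions = []
--     assigned = set()
--     for sq in data:
--         if sq in assigned:
--             continue
--         v = data[sq]
--         region = {sq}
--         changed = True
--         while changed:
--             changed = False
--             for k in data:
--                 if (k not in region and data[k] == v and
--                         ((k[0] + 1, k[1]) in region or (k[0] - 1, k[1]) in region or
--                          (k[0], k[1] + 1) in region or (k[0], k[1] - 1) in region)):
--                     region.add(k)
--                     changed = True
--         assigned |= region
--         regions.append(region)
--     return regions
-- ===== Notes on version B (the rewrite author's own statement) =====
-- stated objective: alternative
-- what changed: Replaced the per-seed frontier/worklist flood fill (a toCheck set popped and refilled with unvisited neighbours) by frontierless fixpoint saturation: for each first-seen cell, repeatedly sweep every grid cell and absorb any same-valued cell adjacent to the region until a sweep adds nothing.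
import Mathlib
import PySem

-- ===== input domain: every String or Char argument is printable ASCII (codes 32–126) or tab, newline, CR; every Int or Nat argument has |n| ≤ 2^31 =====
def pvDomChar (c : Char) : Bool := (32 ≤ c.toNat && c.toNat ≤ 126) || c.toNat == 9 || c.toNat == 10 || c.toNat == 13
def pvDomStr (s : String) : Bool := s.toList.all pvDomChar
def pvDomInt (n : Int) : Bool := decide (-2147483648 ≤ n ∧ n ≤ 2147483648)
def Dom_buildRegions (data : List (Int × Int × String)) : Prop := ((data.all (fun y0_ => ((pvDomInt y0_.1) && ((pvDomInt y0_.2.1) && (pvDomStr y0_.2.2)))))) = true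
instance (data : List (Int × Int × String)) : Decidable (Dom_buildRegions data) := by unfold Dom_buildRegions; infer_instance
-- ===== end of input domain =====

-- B replaces A's per-seed frontier/worklist flood fill by frontierless fixpoint
-- saturation (repeated whole-grid sweeps until a sweep adds nothing); objective:
-- alternative (same results, genuinely different region-growing mechanism).
--
-- The dict parameter is an association list (lookup = first match, keys = first
-- occurrences in order); both ports share these two primitives of that model.
-- Each returned Python value is a SET of cells: the ports represent every emitted
-- set canonically as its elements listed in data-key order (exact at the set level).
-- A's 'toCheck.pop()' pops an arbitrary element of a set; the port pops the first
-- element — exact at the set level: the loop's final region is the same set for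
-- every pop order (the connected component, as the proofs below show).

-- dict lookup, first match (models 'k in data' and 'data[k]')
def pvVal? (data : List (Int × Int × String)) (k : Int × Int) : Option String :=
  match data with
  | [] => none
  | (x, y, v) :: rest => if (x, y) = k then some v else pvVal? rest k

-- dict key iteration order: first occurrences (models 'for k in data')
def pvKeys (data : List (Int × Int × String)) : List (Int × Int) :=
  PySem.List.dedup (data.map (fun p => (p.1, p.2.1)))

-- ===== PORT A =====

def pvOffs : List Int := [-1, 0, 1]

-- the set comprehension over offsets x, y in [-1, 0, 1]
def pvNbrs (data : List (Int × Int × String)) (c : Int × Int)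
    (region : PySem.Set (Int × Int)) : PySem.Set (Int × Int) :=
  PySem.Set.ofList (pvOffs.flatMap (fun x => pvOffs.flatMap (fun y =>
    if (pvVal? data (c.1 + x, c.2 + y)).isSome ∧ x.natAbs + y.natAbs = 1 ∧
        pvVal? data (c.1 + x, c.2 + y) = pvVal? data c ∧ (c.1 + x, c.2 + y) ∉ region
    then [(c.1 + x, c.2 + y)] else [])))

-- 'while len(toCheck) != 0: cur = toCheck.pop(); …'; the fuel argument only makes
-- the recursion total (the proofs below show the fuel given is never exhausted)
def pvALoop (data : List (Int × Int × String)) :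
    Nat → PySem.Set (Int × Int) → PySem.Set (Int × Int) → PySem.Set (Int × Int)
  | 0, region, _ => region
  | fuel + 1, region, toCheck =>
    match toCheck with
    | [] => region
    | cur :: rest =>
      let region' := PySem.Set.add region cur
      pvALoop data fuel region' (PySem.Set.update rest (pvNbrs data cur region'))

def buildRegions (data : List (Int × Int × String)) : List (List (Int × Int)) :=
  (((pvKeys data).foldl
    (fun (st : List (List (Int × Int)) × PySem.Set (Int × Int)) square =>
      if square ∈ st.2 then st
      else
        let region := pvALoop data ((pvKeys data).length + 1) (PySem.Set.ofList [square])
          (pvNbrs data square (PySem.Set.ofList [square]))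
        (st.1 ++ [(pvKeys data).filter (fun k => PySem.Set.contains region k)],
          PySem.Set.update st.2 region))
    ([], PySem.Set.empty)).1)

-- ===== PORT B =====

-- body of the 'for k in data' sweep of the saturation loop; the Bool is 'changed'
def pvBStep (data : List (Int × Int × String)) (v : String) :
    PySem.Set (Int × Int) × Bool → (Int × Int) → PySem.Set (Int × Int) × Bool :=
  fun st k =>
    if k ∉ st.1 ∧ pvVal? data k = some v ∧
        ((k.1 + 1, k.2) ∈ st.1 ∨ (k.1 - 1, k.2) ∈ st.1 ∨
         (k.1, k.2 + 1) ∈ st.1 ∨ (k.1, k.2 - 1) ∈ st.1)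
    then (PySem.Set.add st.1 k, true) else st

-- one full sweep: 'changed = False; for k in data: …'
def pvBPass (data : List (Int × Int × String)) (v : String)
    (region : PySem.Set (Int × Int)) : PySem.Set (Int × Int) × Bool :=
  (pvKeys data).foldl (pvBStep data v) (region, false)

-- 'while changed:'; fuel only makes the recursion total (never exhausted, see proofs)
def pvBLoop (data : List (Int × Int × String)) (v : String) :
    Nat → PySem.Set (Int × Int) → PySem.Set (Int × Int)
  | 0, region => region
  | fuel + 1, region =>
    if (pvBPass data v region).2 then pvBLoop data v fuel (pvBPass data v region).1
    else (pvBPass data v region).1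

def buildRegions_alt (data : List (Int × Int × String)) : List (List (Int × Int)) :=
  (((pvKeys data).foldl
    (fun (st : List (List (Int × Int)) × PySem.Set (Int × Int)) sq =>
      if sq ∈ st.2 then st
      else
        let region := pvBLoop data ((pvVal? data sq).getD "")
          ((pvKeys data).length + 1) (PySem.Set.ofList [sq])
        (st.1 ++ [(pvKeys data).filter (fun k => PySem.Set.contains region k)],
          PySem.Set.update st.2 region))
    ([], PySem.Set.empty)).1)

-- ===== PRECONDITION & SPEC =====
def Spec_buildRegions (data : List (Int × Int × String)) (out : List (List (Int × Int))) : Prop := out = buildRegions_alt data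
instance (data : List (Int × Int × String)) (out : List (List (Int × Int))) : Decidable (Spec_buildRegions data out) := by unfold Spec_buildRegions; infer_instance

-- ===== CLAIM (what is proved, stated in full; the proofs are below) =====
def Claim_equal_buildRegions : Prop := ∀ (data : List (Int × Int × String)), Dom_buildRegions data → Spec_buildRegions data (buildRegions data)

-- ===== LEMMAS AND PROOFS =====

-- 4-adjacency of two cells
def pvAdj (u v : Int × Int) : Prop := (u.1 - v.1).natAbs + (u.2 - v.2).natAbs = 1

-- reachability from sq through present cells of stepwise-equal value:
-- the connected component both loops compute
inductive pvReach (data : List (Int × Int × String)) (sq : Int × Int) : (Int × Int) → Prop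
  | base : pvReach data sq sq
  | step {u v : Int × Int} : pvReach data sq u → (pvVal? data v).isSome = true →
      pvAdj u v → pvVal? data v = pvVal? data u → pvReach data sq v

lemma pvAdj_cases {u v : Int × Int} (h : pvAdj u v) :
    u = (v.1 + 1, v.2) ∨ u = (v.1 - 1, v.2) ∨ u = (v.1, v.2 + 1) ∨ u = (v.1, v.2 - 1) := by
  unfold pvAdj at h
  obtain ⟨a, b⟩ := u
  obtain ⟨c, d⟩ := v
  simp only [Prod.mk.injEq] at *
  omega

lemma mem_pvKeys {data : List (Int × Int × String)} {k : Int × Int} :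
    k ∈ pvKeys data ↔ (pvVal? data k).isSome = true := by
  unfold pvKeys
  rw [PySem.List.mem_dedup]
  induction data with
  | nil => simp [pvVal?]
  | cons p rest ih =>
    obtain ⟨x, y, v⟩ := p
    by_cases h : (x, y) = k
    · simp [pvVal?, h]
    · simp only [List.map_cons, List.mem_cons, pvVal?, if_neg h, ih]
      constructor
      · rintro (h' | h')
        · exact absurd h'.symm (by simpa using h)
        · exact h'
      · exact Or.inr

lemma mem_pvNbrs {data : List (Int × Int × String)} {c n : Int × Int}
    {region : PySem.Set (Int × Int)} :
    n ∈ pvNbrs data c region ↔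
      ((pvVal? data n).isSome = true ∧ pvAdj c n ∧
        pvVal? data n = pvVal? data c ∧ n ∉ region) := by
  unfold pvNbrs
  rw [PySem.Set.mem_ofList]
  simp only [List.mem_flatMap, List.mem_ite_nil_right, List.mem_cons, List.not_mem_nil, or_false]
  constructor
  · rintro ⟨x, hx, y, hy, ⟨hs, hxy, hval, hreg⟩, rfl⟩
    refine ⟨hs, ?_, hval, hreg⟩
    unfold pvAdj
    simp only
    omega
  · rintro ⟨hs, hadj, hval, hreg⟩
    refine ⟨n.1 - c.1, ?_, n.2 - c.2, ?_, ⟨?_, ?_, ?_, ?_⟩, ?_⟩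
    · unfold pvAdj at hadj; simp [pvOffs]; omega
    · unfold pvAdj at hadj; simp [pvOffs]; omega
    · simpa using hs
    · unfold pvAdj at hadj; omega
    · simpa using hval
    · simpa using hreg
    · simp

lemma pvALoop_mem (data : List (Int × Int × String)) (sq : Int × Int) :
    ∀ (fuel : Nat) (region toCheck : PySem.Set (Int × Int)),
      region.Nodup → toCheck.Nodup →
      (∀ t ∈ toCheck, t ∉ region) →
      sq ∈ region →
      (∀ r ∈ region, pvReach data sq r) →
      (∀ t ∈ toCheck, pvReach data sq t) →
      (∀ r ∈ region, (pvVal? data r).isSome = true) →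
      (∀ t ∈ toCheck, (pvVal? data t).isSome = true) →
      (∀ u ∈ region, ∀ v : Int × Int, pvAdj u v → (pvVal? data v).isSome = true →
        pvVal? data v = pvVal? data u → (v ∈ region ∨ v ∈ toCheck)) →
      (pvKeys data).length < fuel + region.length →
      ∀ k, (k ∈ pvALoop data fuel region toCheck ↔ pvReach data sq k) := by
  intro fuel
  induction fuel with
  | zero =>
    intro region toCheck h1 h2 h3 h4 h5 h6 h7 h8 h9 hm k
    exfalso
    have hsub : region ⊆ pvKeys data := fun r hr => mem_pvKeys.mpr (h7 r hr)
    have := (List.subperm_of_subset h1 hsub).length_le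
    omega
  | succ fuel ih =>
    intro region toCheck h1 h2 h3 h4 h5 h6 h7 h8 h9 hm k
    cases toCheck with
    | nil =>
      simp only [pvALoop]
      constructor
      · exact h5 k
      · intro hr
        induction hr with
        | base => exact h4
        | step hu hs hadj hval ihr =>
          rcases h9 _ ihr _ hadj hs hval with h | h
          · exact h
          · exact absurd h (List.not_mem_nil)
    | cons cur rest =>
      simp only [pvALoop]
      have hrest2 := (List.nodup_cons.mp h2)
      have hcur : cur ∉ region := h3 cur (List.mem_cons_self)
      have hlen' : (PySem.Set.add region cur).length = region.length + 1 := by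
        rw [PySem.Set.add_of_not_mem hcur, List.length_append, List.length_cons, List.length_nil]
      refine ih (PySem.Set.add region cur)
        (PySem.Set.update rest (pvNbrs data cur (PySem.Set.add region cur)))
        (PySem.Set.nodup_add _ _ h1)
        (PySem.Set.nodup_update _ _ hrest2.2)
        ?_
        ((PySem.Set.mem_add _ _ _).mpr (Or.inl h4))
        ?_ ?_ ?_ ?_ ?_ (by omega) k
      -- t ∈ toCheck' → t ∉ region'
      · intro t ht
        rcases (PySem.Set.mem_update _ _ _).mp ht with ht | ht
        · intro hc
          rcases (PySem.Set.mem_add _ _ _).mp hc with hc | hc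
          · exact h3 t (List.mem_cons_of_mem _ ht) hc
          · exact hrest2.1 (hc ▸ ht)
        · exact (mem_pvNbrs.mp ht).2.2.2
      -- Reach on region'
      · intro r hr
        rcases (PySem.Set.mem_add _ _ _).mp hr with hr | hr
        · exact h5 r hr
        · exact hr ▸ h6 cur (List.mem_cons_self)
      -- Reach on toCheck'
      · intro t ht
        rcases (PySem.Set.mem_update _ _ _).mp ht with ht | ht
        · exact h6 t (List.mem_cons_of_mem _ ht)
        · obtain ⟨hs, hadj, hval, _⟩ := mem_pvNbrs.mp ht
          exact .step (h6 cur (List.mem_cons_self)) hs hadj hval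
      -- isSome on region'
      · intro r hr
        rcases (PySem.Set.mem_add _ _ _).mp hr with hr | hr
        · exact h7 r hr
        · exact hr ▸ h8 cur (List.mem_cons_self)
      -- isSome on toCheck'
      · intro t ht
        rcases (PySem.Set.mem_update _ _ _).mp ht with ht | ht
        · exact h8 t (List.mem_cons_of_mem _ ht)
        · exact (mem_pvNbrs.mp ht).1
      -- closure
      · intro u hu v hadj hs hval
        rcases (PySem.Set.mem_add _ _ _).mp hu with hu | hu
        · rcases h9 u hu v hadj hs hval with h | h
          · exact Or.inl ((PySem.Set.mem_add _ _ _).mpr (Or.inl h))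
          · rcases List.mem_cons.mp h with h | h
            · exact Or.inl ((PySem.Set.mem_add _ _ _).mpr (Or.inr h))
            · exact Or.inr ((PySem.Set.mem_update _ _ _).mpr (Or.inl h))
        · subst hu
          by_cases hv : v ∈ PySem.Set.add region u
          · exact Or.inl hv
          · exact Or.inr ((PySem.Set.mem_update _ _ _).mpr (Or.inr
              (mem_pvNbrs.mpr ⟨hs, hadj, hval, hv⟩)))

lemma pvNbrTest_iff {reg : PySem.Set (Int × Int)} {k : Int × Int} :
    ((k.1 + 1, k.2) ∈ reg ∨ (k.1 - 1, k.2) ∈ reg ∨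
     (k.1, k.2 + 1) ∈ reg ∨ (k.1, k.2 - 1) ∈ reg) ↔ ∃ u ∈ reg, pvAdj u k := by
  constructor
  · rintro (h | h | h | h) <;> exact ⟨_, h, by unfold pvAdj; simp⟩
  · rintro ⟨u, hu, hadj⟩
    rcases pvAdj_cases hadj with h | h | h | h <;> subst h <;> simp [hu]

lemma pvBPass_aux (data : List (Int × Int × String)) (v : String) (sq : Int × Int) :
    ∀ (l : List (Int × Int)) (reg : PySem.Set (Int × Int)) (ch : Bool),
      reg.Nodup →
      (∀ r ∈ reg, pvReach data sq r) →
      (∀ r ∈ reg, pvVal? data r = some v) →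
      sq ∈ reg →
      (l.foldl (pvBStep data v) (reg, ch)).1.Nodup ∧
      (∀ x ∈ reg, x ∈ (l.foldl (pvBStep data v) (reg, ch)).1) ∧
      (∀ r ∈ (l.foldl (pvBStep data v) (reg, ch)).1, pvReach data sq r) ∧
      (∀ r ∈ (l.foldl (pvBStep data v) (reg, ch)).1, pvVal? data r = some v) ∧
      sq ∈ (l.foldl (pvBStep data v) (reg, ch)).1 ∧
      ((l.foldl (pvBStep data v) (reg, ch)).2 = ch ∧
          (l.foldl (pvBStep data v) (reg, ch)).1 = reg ∨
        (l.foldl (pvBStep data v) (reg, ch)).2 = true ∧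
          reg.length < (l.foldl (pvBStep data v) (reg, ch)).1.length) ∧
      ((l.foldl (pvBStep data v) (reg, ch)).2 = false →
        ∀ k ∈ l, ¬(k ∉ reg ∧ pvVal? data k = some v ∧
          ((k.1 + 1, k.2) ∈ reg ∨ (k.1 - 1, k.2) ∈ reg ∨
           (k.1, k.2 + 1) ∈ reg ∨ (k.1, k.2 - 1) ∈ reg))) := by
  intro l
  induction l with
  | nil =>
    intro reg ch h1 h2 h3 h4
    exact ⟨h1, fun x hx => hx, h2, h3, h4, Or.inl ⟨rfl, rfl⟩, fun _ k hk => absurd hk List.not_mem_nil⟩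
  | cons k l ih =>
    intro reg ch h1 h2 h3 h4
    simp only [List.foldl_cons, pvBStep]
    by_cases hc : k ∉ reg ∧ pvVal? data k = some v ∧
        ((k.1 + 1, k.2) ∈ reg ∨ (k.1 - 1, k.2) ∈ reg ∨
         (k.1, k.2 + 1) ∈ reg ∨ (k.1, k.2 - 1) ∈ reg)
    · rw [if_pos hc]
      obtain ⟨hk, hkv, hnbr⟩ := hc
      obtain ⟨u, hu, hadj⟩ := pvNbrTest_iff.mp hnbr
      have hreachk : pvReach data sq k :=
        .step (h2 u hu) (by simp [hkv]) hadj (by rw [hkv, h3 u hu])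
      have hlen : (PySem.Set.add reg k).length = reg.length + 1 := by
        rw [PySem.Set.add_of_not_mem hk, List.length_append, List.length_cons, List.length_nil]
      have hmem : ∀ x, x ∈ PySem.Set.add reg k ↔ (x ∈ reg ∨ x = k) :=
        fun x => PySem.Set.mem_add _ _ _
      obtain ⟨g1, g2, g3, g4, g5, g6, _⟩ := ih (PySem.Set.add reg k) true
        (PySem.Set.nodup_add _ _ h1)
        (fun r hr => by rcases (hmem r).mp hr with h | h
                        · exact h2 r h
                        · exact h ▸ hreachk)
        (fun r hr => by rcases (hmem r).mp hr with h | h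
                        · exact h3 r h
                        · exact h ▸ hkv)
        ((hmem sq).mpr (Or.inl h4))
      refine ⟨g1, fun x hx => g2 x ((hmem x).mpr (Or.inl hx)), g3, g4, g5, ?_, ?_⟩
      · rcases g6 with ⟨ha, hb⟩ | ⟨ha, hb⟩
        · exact Or.inr ⟨ha, by rw [hb, hlen]; omega⟩
        · exact Or.inr ⟨ha, by omega⟩
      · intro hfalse
        rcases g6 with ⟨ha, _⟩ | ⟨ha, _⟩ <;> rw [ha] at hfalse <;> exact absurd hfalse (by simp)
    · rw [if_neg hc]
      obtain ⟨g1, g2, g3, g4, g5, g6, g7⟩ := ih reg ch h1 h2 h3 h4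
      refine ⟨g1, g2, g3, g4, g5, g6, ?_⟩
      intro hfalse k' hk'
      rcases List.mem_cons.mp hk' with h | h
      · subst h
        rcases g6 with ⟨_, hb⟩ | ⟨ha, _⟩
        · exact hc
        · rw [ha] at hfalse; exact absurd hfalse (by simp)
      · exact g7 hfalse k' h

lemma pvBLoop_mem (data : List (Int × Int × String)) (sq : Int × Int) (v : String) :
    ∀ (fuel : Nat) (reg : PySem.Set (Int × Int)),
      reg.Nodup → sq ∈ reg →
      (∀ r ∈ reg, pvReach data sq r) →
      (∀ r ∈ reg, pvVal? data r = some v) →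
      (pvKeys data).length < fuel + reg.length →
      ∀ k, (k ∈ pvBLoop data v fuel reg ↔ pvReach data sq k) := by
  intro fuel
  induction fuel with
  | zero =>
    intro reg h1 h4 h2 h3 hm k
    exfalso
    have hsub : reg ⊆ pvKeys data := fun r hr => mem_pvKeys.mpr (by simp [h3 r hr])
    have := (List.subperm_of_subset h1 hsub).length_le
    omega
  | succ fuel ih =>
    intro reg h1 h4 h2 h3 hm k
    obtain ⟨g1, g2, g3, gval, g5, g6, g7⟩ :=
      pvBPass_aux data v sq (pvKeys data) reg false h1 h2 h3 h4
    simp only [pvBLoop]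
    by_cases hch : (pvBPass data v reg).2 = true
    · rw [if_pos hch]
      have hgrow : reg.length < (pvBPass data v reg).1.length := by
        rcases g6 with ⟨ha, _⟩ | ⟨_, hb⟩
        · rw [pvBPass] at hch; rw [ha] at hch; exact absurd hch (by simp)
        · exact hb
      exact ih (pvBPass data v reg).1 g1 g5 g3 gval (by omega) k
    · rw [if_neg hch]
      have hfalse : (pvBPass data v reg).2 = false := by
        cases h : (pvBPass data v reg).2
        · rfl
        · exact absurd h hch
      have heq : (pvBPass data v reg).1 = reg := by
        rcases g6 with ⟨_, hb⟩ | ⟨ha, _⟩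
        · exact hb
        · rw [pvBPass] at hfalse; rw [ha] at hfalse; exact absurd hfalse (by simp)
      rw [heq]
      constructor
      · exact h2 _
      · intro hr
        induction hr with
        | base => exact h4
        | step hu hs hadj hval ihr =>
          rename_i u v' 
          by_cases hv' : v' ∈ reg
          · exact hv'
          · exfalso
            have hval' : pvVal? data v' = some v := by rw [hval, h3 u ihr]
            have hmemk : v' ∈ pvKeys data := mem_pvKeys.mpr hs
            exact g7 (by rw [pvBPass] at hfalse; exact hfalse) v' hmemk
              ⟨hv', hval', pvNbrTest_iff.mpr ⟨u, ihr, hadj⟩⟩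

lemma pvRegion_agree (data : List (Int × Int × String)) (sq : Int × Int)
    (hsq : (pvVal? data sq).isSome = true) :
    ∀ k, (k ∈ pvALoop data ((pvKeys data).length + 1) (PySem.Set.ofList [sq])
            (pvNbrs data sq (PySem.Set.ofList [sq])) ↔
          k ∈ pvBLoop data ((pvVal? data sq).getD "")
            ((pvKeys data).length + 1) (PySem.Set.ofList [sq])) := by
  obtain ⟨v, hv⟩ := Option.isSome_iff_exists.mp hsq
  have hone : PySem.Set.ofList [sq] = [sq] := rfl
  have hmem1 : ∀ x : Int × Int, x ∈ PySem.Set.ofList [sq] ↔ x = sq := by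
    intro x; rw [hone]; simp
  intro k
  have hA := pvALoop_mem data sq ((pvKeys data).length + 1) (PySem.Set.ofList [sq])
    (pvNbrs data sq (PySem.Set.ofList [sq]))
    (PySem.Set.nodup_ofList _)
    (by unfold pvNbrs; exact PySem.Set.nodup_ofList _)
    (fun t ht => (mem_pvNbrs.mp ht).2.2.2)
    ((hmem1 sq).mpr rfl)
    (fun r hr => (hmem1 r).mp hr ▸ pvReach.base)
    (fun t ht => by
      obtain ⟨hs, hadj, hval, _⟩ := mem_pvNbrs.mp ht
      exact .step .base hs hadj hval)
    (fun r hr => (hmem1 r).mp hr ▸ hsq)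
    (fun t ht => (mem_pvNbrs.mp ht).1)
    (by
      intro u hu w hadj hs hval
      by_cases hw : w ∈ PySem.Set.ofList [sq]
      · exact Or.inl hw
      · exact Or.inr (mem_pvNbrs.mpr ⟨hs, (hmem1 u).mp hu ▸ hadj, (hmem1 u).mp hu ▸ hval, hw⟩))
    (by rw [hone]; simp)
    k
  have hB := pvBLoop_mem data sq v ((pvKeys data).length + 1) (PySem.Set.ofList [sq])
    (PySem.Set.nodup_ofList _)
    ((hmem1 sq).mpr rfl)
    (fun r hr => (hmem1 r).mp hr ▸ pvReach.base)
    (fun r hr => (hmem1 r).mp hr ▸ hv)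
    (by rw [hone]; simp)
    k
  rw [hv]
  simp only [Option.getD_some]
  rw [hA, hB]

lemma pvOuter_agree (data : List (Int × Int × String)) :
    ∀ (l : List (Int × Int)) (ra rb : List (List (Int × Int)))
      (ca cb : PySem.Set (Int × Int)),
      (∀ x ∈ l, x ∈ pvKeys data) →
      ra = rb → (∀ x : Int × Int, x ∈ ca ↔ x ∈ cb) →
      (l.foldl
        (fun (st : List (List (Int × Int)) × PySem.Set (Int × Int)) square =>
          if square ∈ st.2 then st
          else
            let region := pvALoop data ((pvKeys data).length + 1) (PySem.Set.ofList [square])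
              (pvNbrs data square (PySem.Set.ofList [square]))
            (st.1 ++ [(pvKeys data).filter (fun k => PySem.Set.contains region k)],
              PySem.Set.update st.2 region)) (ra, ca)).1 =
      (l.foldl
        (fun (st : List (List (Int × Int)) × PySem.Set (Int × Int)) sq =>
          if sq ∈ st.2 then st
          else
            let region := pvBLoop data ((pvVal? data sq).getD "")
              ((pvKeys data).length + 1) (PySem.Set.ofList [sq])
            (st.1 ++ [(pvKeys data).filter (fun k => PySem.Set.contains region k)],
              PySem.Set.update st.2 region)) (rb, cb)).1 := by
  intro l
  induction l with
  | nil =>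
    intro ra rb ca cb _ hr _
    simpa using hr
  | cons sq l ih =>
    intro ra rb ca cb hsub hr hc
    have hsq : (pvVal? data sq).isSome = true :=
      mem_pvKeys.mp (hsub sq List.mem_cons_self)
    simp only [List.foldl_cons]
    by_cases h : sq ∈ ca
    · rw [if_pos h, if_pos ((hc sq).mp h)]
      exact ih ra rb ca cb (fun x hx => hsub x (List.mem_cons_of_mem _ hx)) hr hc
    · rw [if_neg h, if_neg (fun h' => h ((hc sq).mpr h'))]
      have hreg := pvRegion_agree data sq hsq
      have hfilter :
          (pvKeys data).filter (fun k => PySem.Set.contains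
            (pvALoop data ((pvKeys data).length + 1) (PySem.Set.ofList [sq])
              (pvNbrs data sq (PySem.Set.ofList [sq]))) k) =
          (pvKeys data).filter (fun k => PySem.Set.contains
            (pvBLoop data ((pvVal? data sq).getD "")
              ((pvKeys data).length + 1) (PySem.Set.ofList [sq])) k) := by
        apply List.filter_congr
        intro k _
        rw [Bool.eq_iff_iff, PySem.Set.contains_iff, PySem.Set.contains_iff]
        exact hreg k
      refine ih _ _ _ _ (fun x hx => hsub x (List.mem_cons_of_mem _ hx)) ?_ ?_
      · rw [hr, hfilter]
      · intro x
        rw [PySem.Set.mem_update, PySem.Set.mem_update]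
        constructor
        · rintro (hx | hx)
          · exact Or.inl ((hc x).mp hx)
          · exact Or.inr ((hreg x).mp hx)
        · rintro (hx | hx)
          · exact Or.inl ((hc x).mpr hx)
          · exact Or.inr ((hreg x).mpr hx)

-- ===== VERDICT (by name: the statement is the Claim_ definition above) =====
theorem buildRegions_spec : Claim_equal_buildRegions := by
  intro data _
  unfold Spec_buildRegions buildRegions buildRegions_alt
  exact pvOuter_agree data (pvKeys data) [] [] PySem.Set.empty PySem.Set.empty
    (fun x hx => hx) rfl (fun x => Iff.rfl)
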